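-- pv_equiv track=rewrite | github.com/hermanwu/algorithm-woo | company/robinhood/course-mid.py | mid_course_2
-- ===== SOURCE A (Python) =====
-- from collections import defaultdict
--
-- def mid_course_2(relations):
--   def load(r):
--     res = defaultdict(list)
--     for pair in r:
--       res[pair[0]].append(pair[1])
--     return res
--
--   dag = load(relations)
--   key_set = dag.keys()
--   value_set = set([item for x in dag.values() for item in x])
--   start = key_set - value_set
--   res = set()
--   def dfs(root, track):
--     if root not in dag or len(dag[root]) == 0:
--       res.add(track[(len(track) - 1) // 2])
--     for course in dag[root]:
--       track.append(course)
--       dfs(course, track)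
--       track.pop()
--
--   for course in start:
--     dfs(course, [course])
--   return list(res)
-- ===== SOURCE B (Python) =====
-- def mid_course_2(relations):
--   graph = {}
--   for p in relations:
--     graph.setdefault(p[0], []).append(p[1])
--   targets = {b for bs in graph.values() for b in bs}
--   res = set()
--   for root in graph:
--     if root in targets:
--       continue
--     stack = [(root, (root,))]
--     while stack:
--       node, rpath = stack.pop()
--       children = graph.get(node)
--       if not children:
--         res.add(rpath[len(rpath) // 2])
--       else:
--         for c in reversed(children):
--           stack.append((c, (c,) + rpath))
--   return list(res)
-- ===== Notes on version B (the rewrite author's own statement) =====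
-- stated objective: alternative
-- what changed: B replaces A's recursive DFS with mutated track/backtracking (and the intermediate key-view/value-set difference) by an explicit-stack iteration whose entries carry the reversed path, reading the middle as rpath[len(rpath)//2] and building the adjacency map with setdefault.
import Mathlib
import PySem

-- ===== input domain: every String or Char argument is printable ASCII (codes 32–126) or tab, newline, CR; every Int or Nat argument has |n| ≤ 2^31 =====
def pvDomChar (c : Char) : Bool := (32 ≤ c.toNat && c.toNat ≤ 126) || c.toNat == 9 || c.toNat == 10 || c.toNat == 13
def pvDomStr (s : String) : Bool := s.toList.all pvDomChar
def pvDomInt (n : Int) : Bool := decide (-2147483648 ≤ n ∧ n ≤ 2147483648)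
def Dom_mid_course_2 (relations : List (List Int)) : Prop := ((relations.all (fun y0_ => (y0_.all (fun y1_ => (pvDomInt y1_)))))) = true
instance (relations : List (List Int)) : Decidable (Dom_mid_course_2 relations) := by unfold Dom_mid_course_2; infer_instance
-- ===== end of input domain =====

-- B replaces A's recursive all-paths DFS by an explicit-stack loop over reversed path suffixes
-- (an alternative decomposition of the same traversal, not claimed faster).

-- ===== PORT A =====
-- p[i] for an index that is in range on every admitted input (Pre_ gives 2 ≤ length of every pair,
-- and the middle index is always in range); exact there
def pvAt (p : List Int) (i : Int) : Int := PySem.List.pyGetD p i 0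

-- load(r): defaultdict(list) with res[pair[0]].append(pair[1]) = Dict.modify with default []
def pvLoad (relations : List (List Int)) : PySem.Dict Int (List Int) :=
  relations.foldl (fun d p => d.modify (pvAt p 0) [] (· ++ [pvAt p 1])) PySem.Dict.empty

-- dfs(root, track): the fuel argument is only a totality guard; on every input admitted by
-- Pre_ (no cycle reachable from a start node) the recursion depth is at most relations.length,
-- so the guard never fires there
def pvDfs (dag : PySem.Dict Int (List Int)) (fuel : Nat) (root : Int) (track : List Int)
    (res : PySem.Set Int) : PySem.Set Int :=
  let children := dag.getD root []
  let res1 := if children.isEmpty then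
      PySem.Set.add res (pvAt track (PySem.Int.floordiv ((track.length : Int) - 1) 2))
    else res
  match fuel with
  | 0 => res1
  | f + 1 => children.foldl (fun r c => pvDfs dag f c (track ++ [c]) r) res1
termination_by fuel

def mid_course_2 (relations : List (List Int)) : List Int :=
  let dag := pvLoad relations
  let valueSet := PySem.Set.ofList (dag.values.flatMap (fun x => x))
  -- start = key_set - value_set: keys are distinct, so the set difference is this filter
  -- (one set-order-independent representative; Python's set iteration order is not modelled,
  -- and the function's result is consumed as a set)
  let start := dag.keys.filter (fun k => ! PySem.Set.contains valueSet k)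
  start.foldl (fun r course => pvDfs dag (relations.length + 1) course [course] r) PySem.Set.empty

-- ===== PORT B =====
-- graph.setdefault(p[0], []).append(p[1])
def pvLoadB (relations : List (List Int)) : PySem.Dict Int (List Int) :=
  relations.foldl (fun g p => g.insert (pvAt p 0) (g.getD (pvAt p 0) [] ++ [pvAt p 1]))
    PySem.Dict.empty

-- {b for bs in graph.values() for b in bs}
def pvTargets (graph : PySem.Dict Int (List Int)) : PySem.Set Int :=
  graph.values.foldl (fun s bs => bs.foldl (fun t x => PySem.Set.add t x) s) PySem.Set.empty

-- termination bound for the stack loop: one more than the total size of all adjacency lists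
def pvW (graph : PySem.Dict Int (List Int)) : Nat := (graph.values.map List.length).sum + 1

theorem pv_getD_length_lt (graph : PySem.Dict Int (List Int)) (k : Int) :
    (graph.getD k []).length < pvW graph := by
  unfold pvW
  rcases h : graph.get? k with _ | v
  · rw [PySem.Dict.getD_of_get?_eq_none graph [] h]; simp
  · rw [PySem.Dict.getD_of_get?_eq_some graph [] h]
    have hv : v.length ∈ graph.values.map List.length := by
      refine List.mem_map_of_mem ?_
      have hm := PySem.Dict.mem_items_of_get?_eq_some graph h
      simpa [PySem.Dict.values] using List.mem_map_of_mem (f := Prod.snd) hm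
    have := List.single_le_sum (l := graph.values.map List.length) (fun x _ => Nat.zero_le x) _ hv
    omega

-- the while-stack loop of B: pop (fuel, node, reversed path); a leaf contributes
-- rpath[len(rpath)//2]; otherwise the children are pushed with the first child on top
-- (the list-stack transcription of Python's stack.extend(reversed(children)) + stack.pop()).
-- The per-entry fuel is only a totality guard and never fires on inputs admitted by Pre_.
def pvRun (graph : PySem.Dict Int (List Int)) (stack : List (Nat × Int × List Int))
    (res : PySem.Set Int) : PySem.Set Int :=
  match stack with
  | [] => res
  | (f, node, rpath) :: rest =>
    let children := graph.getD node []
    if children.isEmpty then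
      pvRun graph rest
        (PySem.Set.add res (pvAt rpath (PySem.Int.floordiv (rpath.length : Int) 2)))
    else
      match f with
      | 0 => pvRun graph rest res
      | g + 1 => pvRun graph (children.map (fun c => (g, c, c :: rpath)) ++ rest) res
termination_by (stack.map (fun e => pvW graph ^ e.1)).sum
decreasing_by
  · simp only [List.map_cons, List.sum_cons]
    exact Nat.lt_add_of_pos_left (pow_pos (by unfold pvW; omega) _)
  · simp only [List.map_cons, List.sum_cons]
    exact Nat.lt_add_of_pos_left (pow_pos (by unfold pvW; omega) _)
  · simp only [List.map_cons, List.sum_cons, List.map_append, List.sum_append, List.map_map,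
      Function.comp_def]
    have hb := pv_getD_length_lt graph node
    have hp : 0 < pvW graph ^ g := pow_pos (by unfold pvW; omega) g
    have e1 : (List.map (fun _ => pvW graph ^ g) (graph.getD node [])).sum
        = (graph.getD node []).length * pvW graph ^ g := by
      simp [List.map_const', List.sum_replicate, smul_eq_mul]
    rw [e1]
    have e2 : (graph.getD node []).length * pvW graph ^ g < pvW graph ^ (g + 1) := by
      rw [pow_succ']
      exact Nat.mul_lt_mul_of_pos_right hb hp
    exact Nat.add_lt_add_right e2 _

def mid_course_2_alt (relations : List (List Int)) : List Int :=
  let graph := pvLoadB relations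
  let targets := pvTargets graph
  graph.keys.foldl
    (fun res root =>
      if PySem.Set.contains targets root then res
      else pvRun graph [(relations.length + 1, root, [root])] res)
    PySem.Set.empty

-- ===== PRECONDITION & SPEC =====
-- successors of v in the edge list (pairs read positionally, as both programs do)
def pvSuccs (relations : List (List Int)) (v : Int) : List Int :=
  relations.filterMap (fun p => if p.getD 0 0 = v then some (p.getD 1 0) else none)

-- one expansion step of a reachability front
def pvStep (relations : List (List Int)) (s : List Int) : List Int :=
  (s ++ s.flatMap (pvSuccs relations)).dedup

def pvRoots (relations : List (List Int)) : List Int :=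
  (relations.map (fun p => p.getD 0 0)).filter
    (fun a => ¬ a ∈ relations.map (fun p => p.getD 1 0))

-- Pre_ excludes exactly the inputs on which the Python A raises: a pair shorter than 2 entries
-- (IndexError in load) or a cycle reachable from a start node (unbounded recursion).
def Pre_mid_course_2 (relations : List (List Int)) : Prop :=
  (∀ p ∈ relations, 2 ≤ p.length) ∧
  (∀ v ∈ (pvStep relations)^[relations.length] (pvRoots relations),
     v ∉ (pvStep relations)^[relations.length] (pvSuccs relations v))
instance (relations : List (List Int)) : Decidable (Pre_mid_course_2 relations) := by
  unfold Pre_mid_course_2; infer_instance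

def pvWitness_mid_course_2 : List (List Int) := [[1, 2], [1, 3], [2, 3], [3, 4]]

def Spec_mid_course_2 (relations : List (List Int)) (out : List Int) : Prop := out = mid_course_2_alt relations
instance (relations : List (List Int)) (out : List Int) : Decidable (Spec_mid_course_2 relations out) := by unfold Spec_mid_course_2; infer_instance

-- ===== CLAIM (what is proved, stated in full; the proofs are below) =====
def Claim_equal_mid_course_2 : Prop := ∀ (relations : List (List Int)), Dom_mid_course_2 relations → Pre_mid_course_2 relations → Spec_mid_course_2 relations (mid_course_2 relations)

-- ===== LEMMAS AND PROOFS =====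

-- A reads the middle of the track from the front, B reads it from the back of the reversed track:
-- same element.
theorem pv_mid_eq (track : List Int) (h : track ≠ []) :
    pvAt track.reverse (PySem.Int.floordiv ((track.reverse.length : Int)) 2)
      = pvAt track (PySem.Int.floordiv ((track.length : Int) - 1) 2) := by
  have hL : 1 ≤ track.length := List.length_pos_iff.mpr h
  rw [List.length_reverse]
  unfold pvAt
  rw [show PySem.Int.floordiv ((track.length : Int)) 2 = ((track.length / 2 : Nat) : Int) by
        rw [PySem.Int.floordiv_eq_ediv_of_pos (by norm_num)]; omega]
  rw [show PySem.Int.floordiv ((track.length : Int) - 1) 2 = (((track.length - 1) / 2 : Nat) : Int) by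
        rw [PySem.Int.floordiv_eq_ediv_of_pos (by norm_num)]; omega]
  rw [PySem.List.pyGetD_natCast, PySem.List.pyGetD_natCast]
  rw [List.getD_eq_getElem?_getD, List.getD_eq_getElem?_getD]
  rw [List.getElem?_reverse (by omega)]
  congr 2
  omega

theorem pv_run_nil (graph : PySem.Dict Int (List Int)) (res : PySem.Set Int) :
    pvRun graph [] res = res := by
  rw [pvRun]

-- the stack machine of B runs A's recursion: processing one stack entry is one dfs call
theorem pv_run_eq (graph : PySem.Dict Int (List Int)) :
    ∀ (f : Nat) (node : Int) (track : List Int), track ≠ [] →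
      ∀ (rest : List (Nat × Int × List Int)) (res : PySem.Set Int),
      pvRun graph ((f, node, track.reverse) :: rest) res
        = pvRun graph rest (pvDfs graph f node track res) := by
  intro f
  induction f with
  | zero =>
    intro node track ht rest res
    rw [pvRun, pvDfs]
    by_cases hc : (graph.getD node []).isEmpty
    · simp only [hc, if_pos]
      rw [List.length_reverse] at *
      rw [show pvAt track.reverse (PySem.Int.floordiv ((track.length : Int)) 2)
            = pvAt track (PySem.Int.floordiv ((track.length : Int) - 1) 2) by
          have := pv_mid_eq track ht; rwa [List.length_reverse] at this]
    · simp only [hc]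
      simp at hc
      simp
  | succ g ih =>
    intro node track ht rest res
    rw [pvRun, pvDfs]
    by_cases hc : (graph.getD node []).isEmpty
    · simp only [hc, ite_true]
      have hnil : graph.getD node [] = [] := List.isEmpty_iff.mp hc
      rw [hnil]
      simp only [List.foldl_nil]
      rw [show pvAt track.reverse (PySem.Int.floordiv ((track.reverse.length : Int)) 2)
            = pvAt track (PySem.Int.floordiv ((track.length : Int) - 1) 2) from pv_mid_eq track ht]
    · simp only [hc]
      generalize graph.getD node [] = cs
      induction cs generalizing rest res with
      | nil => simp [List.foldl_nil]
      | cons c cs ihc =>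
        simp only [List.map_cons, List.cons_append, List.foldl_cons]
        rw [show (c :: track.reverse) = (track ++ [c]).reverse by simp]
        rw [ih c (track ++ [c]) (by simp) _ res]
        exact ihc _ _

theorem pv_run_root (graph : PySem.Dict Int (List Int)) (F : Nat) (r : Int)
    (res : PySem.Set Int) :
    pvRun graph [(F, r, [r])] res = pvDfs graph F r [r] res := by
  have h := pv_run_eq graph F r [r] (by simp) [] res
  simpa [pv_run_nil] using h

-- the two load loops build the same dict (modify with default [] IS the setdefault/append step)
theorem pv_load_eq (relations : List (List Int)) : pvLoadB relations = pvLoad relations := rfl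

-- the nested set-building loop of B is A's set([... for x in values for item in x])
theorem pv_targets_eq (g : PySem.Dict Int (List Int)) :
    pvTargets g = PySem.Set.ofList (g.values.flatMap (fun x => x)) := by
  unfold pvTargets
  simp only [PySem.Set.ofList_eq_foldl, List.flatMap_id', List.foldl_flatten]
  rfl

-- ===== VERDICT (by name: the statement is the Claim_ definition above) =====
theorem mid_course_2_spec : Claim_equal_mid_course_2 := by
  intro relations _ _
  unfold Spec_mid_course_2
  simp only [mid_course_2, mid_course_2_alt]
  rw [pv_load_eq, pv_targets_eq]
  rw [List.foldl_filter]
  congr 1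
  funext x y
  by_cases hx : PySem.Set.contains
      (PySem.Set.ofList ((pvLoad relations).values.flatMap (fun x => x))) y = true
  · rw [if_neg (by simp only [hx, Bool.not_true, Bool.false_eq_true]; exact not_false), if_pos hx]
  · have hb : PySem.Set.contains
        (PySem.Set.ofList ((pvLoad relations).values.flatMap (fun x => x))) y = false := by
      cases hcb : PySem.Set.contains
          (PySem.Set.ofList ((pvLoad relations).values.flatMap (fun x => x))) y
      · rfl
      · exact absurd hcb hx
    rw [if_pos (by simp only [hb, Bool.not_false]), if_neg hx, pv_run_root]
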